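-- pv_equiv track=rewrite | github.com/ozkayas/leetcode_solutions | 9999-A2Z-OA/Number of Suitable Locations.py | countStars
-- ===== SOURCE A (Python) =====
-- def countStars(s):
--     count = {}
--     start = None
--     for i in range(len(s)):
--         if s[i] == "|":
--             if start is not None:
--                 count[(start, i)] = s[start+1:i].count("*")
--                 start = None
--             else:
--                 start = i
--     return count
-- ===== SOURCE B (Python) =====
-- def countStars(s):
--     bars = [i for i, c in enumerate(s) if c == "|"]
--     count = {}
--     for j in range(0, len(bars) - 1, 2):
--         a, b = bars[j], bars[j + 1]
--         count[(a, b)] = s[a + 1:b].count("*")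
--     return count
-- ===== Notes on version B (the rewrite author's own statement) =====
-- stated objective: simpler
-- what changed: Replaces A's single-pass start/None toggle state machine with a toggle-free decomposition: first collect all bar indices with a comprehension, then pair them two at a time with a stride-2 index loop and count stars in each slice.
import Mathlib
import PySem

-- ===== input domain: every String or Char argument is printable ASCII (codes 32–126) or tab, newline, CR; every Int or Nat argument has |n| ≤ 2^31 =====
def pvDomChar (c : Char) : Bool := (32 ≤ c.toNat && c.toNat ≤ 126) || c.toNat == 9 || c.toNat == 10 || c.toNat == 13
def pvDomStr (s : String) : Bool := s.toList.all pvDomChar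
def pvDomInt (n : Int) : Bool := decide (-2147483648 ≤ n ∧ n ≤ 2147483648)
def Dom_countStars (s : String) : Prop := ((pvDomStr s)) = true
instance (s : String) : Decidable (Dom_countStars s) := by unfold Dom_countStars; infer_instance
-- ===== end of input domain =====

-- B replaces A's start/None toggle state machine with a bar-index list paired by a stride-2 loop (objective: simpler decomposition).
-- Both Pythons' dict keys (start, i) are pairwise distinct (starts strictly increase), so each dict
-- assignment is a fresh-key insertion; both dicts are ported exactly as the insertion-order list of
-- (start, i, value) triples.

-- ===== PORT A =====
def countStars (s : String) : List (Int × Int × Int) :=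
  ((PySem.List.pyRange 0 (PySem.Str.len s) 1).foldl
    (fun (st : List (Int × Int × Int) × Option Int) i =>
      if PySem.Str.pyGet? s i = some '|' then
        match st.2 with
        | some start =>
            (st.1 ++ [(start, i, (PySem.Str.count (PySem.Str.slice s (some (start + 1)) (some i)) "*" : Int))],
             (none : Option Int))
        | none => (st.1, some i)
      else st)
    ([], none)).1

-- ===== PORT B =====
def countStars_alt (s : String) : List (Int × Int × Int) :=
  let bars : List Int := ((PySem.List.enumerate s.toList 0).filter (fun p => p.2 == '|')).map (fun p => p.1)
  -- every index j, j+1 visited by the stride-2 range is < len(bars), so bars[j] is in range and pyGetD is exact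
  (PySem.List.pyRange 0 ((bars.length : Int) - 1) 2).foldl
    (fun acc j =>
      let a := PySem.List.pyGetD bars j 0
      let b := PySem.List.pyGetD bars (j + 1) 0
      acc ++ [(a, b, (PySem.Str.count (PySem.Str.slice s (some (a + 1)) (some b)) "*" : Int))])
    []

-- ===== PRECONDITION & SPEC =====
def Spec_countStars (s : String) (out : List (Int × Int × Int)) : Prop := out = countStars_alt s
instance (s : String) (out : List (Int × Int × Int)) : Decidable (Spec_countStars s out) := by unfold Spec_countStars; infer_instance

-- ===== CLAIM (what is proved, stated in full; the proofs are below) =====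
def Claim_equal_countStars : Prop := ∀ (s : String), Dom_countStars s → Spec_countStars s (countStars s)

-- ===== LEMMAS AND PROOFS =====

-- the star count of the slice between bars a and b
def pvF (s : String) (a b : Int) : Int :=
  (PySem.Str.count (PySem.Str.slice s (some (a + 1)) (some b)) "*" : Int)

-- pairing the bar positions two at a time, starting with a possibly pending bar
def pairUpSt (s : String) : Option Int → List Int → List (Int × Int × Int)
  | none, [] => []
  | none, a :: t => pairUpSt s (some a) t
  | some _, [] => []
  | some a, b :: t => (a, b, pvF s a b) :: pairUpSt s none t

-- the toggle state left after processing the bar positions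
def stEnd : Option Int → List Int → Option Int
  | st, [] => st
  | none, a :: t => stEnd (some a) t
  | some _, _ :: t => stEnd none t

-- A's loop body on an (index, char) pair
def aStep (s : String) (st : List (Int × Int × Int) × Option Int) (p : Int × Char) :
    List (Int × Int × Int) × Option Int :=
  if p.2 == '|' then
    match st.2 with
    | some start => (st.1 ++ [(start, p.1, pvF s start p.1)], (none : Option Int))
    | none => (st.1, some p.1)
  else st

theorem aStep_skip (s : String) (st : List (Int × Int × Int) × Option Int) (p : Int × Char)
    (h : ¬ p.2 == '|') : aStep s st p = st := by
  simp [aStep, h]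

-- pyRange with step 2: cons and nil forms
theorem pyRange_two_cons (a b : Int) (h : a < b) :
    PySem.List.pyRange a b 2 = a :: PySem.List.pyRange (a + 2) b 2 := by
  rw [PySem.List.pyRange_of_pos a b (by norm_num), PySem.List.pyRange_of_pos (a + 2) b (by norm_num)]
  by_cases h2 : a + 2 < b
  · have hn : ((b - a + 2 - 1) / 2).toNat = ((b - (a + 2) + 2 - 1) / 2).toNat + 1 := by omega
    rw [if_pos h, if_pos h2, hn, List.range_succ_eq_map, List.map_cons, List.map_map]
    congr 1
    · norm_num
    · simp only [List.map_inj_left, Function.comp_apply]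
      intro k _
      push_cast
      ring
  · have hn : ((b - a + 2 - 1) / 2).toNat = 1 := by omega
    rw [if_pos h, if_neg h2, hn]
    simp

theorem pyRange_two_nil (a b : Int) (h : b ≤ a) :
    PySem.List.pyRange a b 2 = [] := by
  rw [PySem.List.pyRange_of_pos a b (by norm_num), if_neg (by omega)]
  simp

-- A's index loop is the aStep fold over enumerate
theorem a_loop_eq_enum (s : String) :
    countStars s = ((PySem.List.enumerate s.toList 0).foldl (aStep s) ([], none)).1 := by
  unfold countStars
  rw [PySem.List.enumerate_eq_map_pyRange s.toList ' ', List.foldl_map]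
  congr 1
  apply PySem.List.foldl_congr_mem
  intro st j hj
  have hj' : 0 ≤ j ∧ j < (s.toList.length : Int) := by
    have := (PySem.List.mem_pyRange_one).1 (by simpa using hj)
    simpa using this
  obtain ⟨h0, h1⟩ := hj'
  have hlt : j.toNat < s.toList.length := by omega
  have hls : s.toList.length = s.length := String.length_toList
  have hget : PySem.List.pyGet? s.toList j = s.toList[j.toNat]? := by
    simp only [PySem.List.pyGet?, PySem.List.pyIdx?]
    split_ifs
    all_goals simp_all
  rw [List.getElem?_eq_getElem hlt] at hget
  rw [PySem.List.pyGetD_eq_getElem s.toList ' ' h0 h1]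
  by_cases hc : s.toList[j.toNat] = '|' <;>
    simp [aStep, hget, hc, pvF]

-- dropping the non-bar characters does not change the fold
theorem a_loop_filter (s : String) (e : List (Int × Char)) (st : List (Int × Int × Int) × Option Int) :
    e.foldl (aStep s) st = (e.filter (fun p => p.2 == '|')).foldl (aStep s) st := by
  induction e generalizing st with
  | nil => rfl
  | cons p t ih =>
    by_cases h : p.2 == '|'
    · simp [h, List.foldl_cons, ih]
    · simp [h, List.foldl_cons, ih, aStep_skip s st p (by simp_all)]

-- the toggle fold over an all-bar list is pairUpSt
theorem a_loop_toggle (s : String) (e : List (Int × Char)) (h : ∀ p ∈ e, p.2 = '|') :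
    ∀ (acc : List (Int × Int × Int)) (st : Option Int),
      e.foldl (aStep s) (acc, st) = (acc ++ pairUpSt s st (e.map (·.1)), stEnd st (e.map (·.1))) := by
  induction e with
  | nil => intro acc st; cases st <;> simp [pairUpSt, stEnd]
  | cons p t ih =>
    intro acc st
    have hp : p.2 = '|' := h p (by simp)
    have ht : ∀ q ∈ t, q.2 = '|' := fun q hq => h q (by simp [hq])
    cases st with
    | none =>
        simp only [List.foldl_cons, aStep, hp, beq_self_eq_true]
        simpa [pairUpSt, stEnd] using ih ht acc (some p.1)
    | some a =>
        simp only [List.foldl_cons, aStep, hp, beq_self_eq_true]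
        have := ih ht (acc ++ [(a, p.1, pvF s a p.1)]) none
        simpa [pairUpSt, stEnd, List.append_assoc] using this
  
-- B's stride-2 loop over the bar list is pairUpSt from position k
theorem b_loop (s : String) (bs : List Int) :
    ∀ (n k : Nat), bs.length - k = n → ∀ (acc : List (Int × Int × Int)),
      (PySem.List.pyRange (k : Int) ((bs.length : Int) - 1) 2).foldl
        (fun acc j =>
          let a := PySem.List.pyGetD bs j 0
          let b := PySem.List.pyGetD bs (j + 1) 0
          acc ++ [(a, b, (PySem.Str.count (PySem.Str.slice s (some (a + 1)) (some b)) "*" : Int))]) acc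
      = acc ++ pairUpSt s none (bs.drop k) := by
  intro n
  induction n using Nat.strong_induction_on with
  | _ n ih =>
    intro k hk acc
    by_cases h1 : (k : Int) < (bs.length : Int) - 1
    · have hk1 : k + 1 < bs.length := by omega
      have hk0 : k < bs.length := by omega
      rw [pyRange_two_cons _ _ h1, List.foldl_cons]
      have e1 : PySem.List.pyGetD bs (k : Int) 0 = bs[k] :=
        PySem.List.pyGetD_eq_getElem bs 0 (by omega) (by exact_mod_cast hk0)
      have e2 : PySem.List.pyGetD bs ((k : Int) + 1) 0 = bs[k + 1] := by
        have : ((k : Int) + 1) = ((k + 1 : Nat) : Int) := by push_cast; ring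
        rw [this]
        exact PySem.List.pyGetD_eq_getElem bs 0 (by omega) (by exact_mod_cast hk1)
      have hdrop : bs.drop k = bs[k] :: bs[k + 1] :: bs.drop (k + 2) := by
        rw [List.drop_eq_getElem_cons hk0, List.drop_eq_getElem_cons hk1]
      have hcast : (k : Int) + 2 = ((k + 2 : Nat) : Int) := by push_cast; ring
      rw [e1, e2, hcast, ih (bs.length - (k + 2)) (by omega) (k + 2) rfl, hdrop]
      simp [pairUpSt, pvF]
    · rw [pyRange_two_nil _ _ (by omega), List.foldl_nil]
      have hlen : (bs.drop k).length ≤ 1 := by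
        simp only [List.length_drop]; omega
      match hd : bs.drop k with
      | [] => simp [pairUpSt]
      | [a] => simp [pairUpSt]
      | a :: b :: t => rw [hd] at hlen; simp at hlen

-- ===== VERDICT (by name: the statement is the Claim_ definition above) =====
-- B computes pairUpSt of the bar list
theorem b_eq (s : String) :
    countStars_alt s
      = pairUpSt s none (((PySem.List.enumerate s.toList 0).filter (fun p => p.2 == '|')).map (fun p => p.1)) := by
  have hb := b_loop s (((PySem.List.enumerate s.toList 0).filter (fun p => p.2 == '|')).map (fun p => p.1))
    _ 0 rfl []
  simp only [Nat.cast_zero, List.drop_zero, List.nil_append] at hb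
  simpa only [countStars_alt] using hb

theorem countStars_spec : Claim_equal_countStars := by
  intro s _
  unfold Spec_countStars
  rw [a_loop_eq_enum, a_loop_filter]
  rw [a_loop_toggle s _ (fun p hp => by simpa using (List.mem_filter.1 hp).2) [] none]
  rw [b_eq]
  simp
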